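-- pv_equiv track=rewrite | github.com/erelsgl/indivisible-competitive-equilibrium | competitive_equilibrium.py | _budget_constraints
-- ===== SOURCE A (Python) =====
-- def _bundle_to_row(all_items:str, bundle:str, coefficient:float)->list:
--     """
--     Given a bundle (as a string),
--           construct a row of coefficients that represents this bundle.
--     :param all_items:  a string representing all items in a certain fixed order.
--     :param bundle:     a string representing a subset of the items.
--     :param coefficient: the coefficient to put in the row for each item in the bundle.
--     :return:  a list where all locations that correspond to the bundle equal coefficient, and all others equal 0.
--
--     >>> _bundle_to_row("wxyz", "wy", 1)
--     [1, 0, 1, 0]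
--     >>> _bundle_to_row("wxyz", "", 1)
--     [0, 0, 0, 0]
--     >>> _bundle_to_row("wxyz", "zxyw", -1)
--     [-1, -1, -1, -1]
--     """
--     result = len(all_items) * [0]
--     for item in bundle:
--         result[all_items.index(item)] = coefficient
--     return result
--
-- def _budget_constraints(all_items: str, budgets: list, allocation: list)->tuple:
--     """
--     Create the budget constraints (equalities) of a CE.
--          bundle_i   * [prices,slack]  == budget_i
--          A_equality * [prices,slack]  == b_equality
--
--     :param all_items:    a string in which each char represents an item.
--     :param budgets:  a list of numbers, each represents the budget of one agent.
--     :param allocation:   a list of strings, each represents the bundle allocated to one agent (by the same order as the budgets).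
--
--     :return: (A_equality, b_equality)
--
--     >>> (A_eq,b_eq) = _budget_constraints("wxyz", [5,2], ["xz","y"])
--     >>> A_eq
--     [[0, 1, 0, 1, 0], [0, 0, 1, 0, 0]]
--     >>> b_eq
--     [5, 2]
--     """
--     num_agents = len(budgets)
--     A_equality = []
--     b_equality = []
--     for i in range(num_agents):
--         if len(allocation[i])>0 or budgets[i]<0:
--             row = _bundle_to_row(all_items, allocation[i], 1)
--             row.append(0)    # the slack is irrelevant for the budget equalities
--             A_equality.append(row)
--             b_equality.append(budgets[i])
--     return (A_equality, b_equality)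
-- ===== SOURCE B (Python) =====
-- def _budget_constraints(all_items: str, budgets: list, allocation: list) -> tuple:
--     # Build the matrix column-major: filter the kept agents once, precompute each
--     # kept agent's set of column indices, generate one column per item position
--     # plus the slack column, then transpose with zip(*...).
--     kept = [(bud, bundle) for bud, bundle in zip(budgets, allocation)
--             if bundle or bud < 0]
--     occupied = [{all_items.index(ch) for ch in bundle} for _, bundle in kept]
--     columns = [[1 if i in s else 0 for s in occupied] for i in range(len(all_items))]
--     columns.append([0] * len(kept))
--     A_equality = [list(row) for row in zip(*columns)]
--     b_equality = [bud for bud, _ in kept]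
--     return (A_equality, b_equality)
-- ===== Notes on version B (the rewrite author's own statement) =====
-- stated objective: alternative
-- what changed: B builds the constraint matrix column-major in staged passes -- filter the kept agents once, precompute each agent's set of column indices, emit one column per item position plus the slack column, then transpose with zip(*columns) -- instead of A's row-by-row zero-fill-and-index-write loop.
import Mathlib
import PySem

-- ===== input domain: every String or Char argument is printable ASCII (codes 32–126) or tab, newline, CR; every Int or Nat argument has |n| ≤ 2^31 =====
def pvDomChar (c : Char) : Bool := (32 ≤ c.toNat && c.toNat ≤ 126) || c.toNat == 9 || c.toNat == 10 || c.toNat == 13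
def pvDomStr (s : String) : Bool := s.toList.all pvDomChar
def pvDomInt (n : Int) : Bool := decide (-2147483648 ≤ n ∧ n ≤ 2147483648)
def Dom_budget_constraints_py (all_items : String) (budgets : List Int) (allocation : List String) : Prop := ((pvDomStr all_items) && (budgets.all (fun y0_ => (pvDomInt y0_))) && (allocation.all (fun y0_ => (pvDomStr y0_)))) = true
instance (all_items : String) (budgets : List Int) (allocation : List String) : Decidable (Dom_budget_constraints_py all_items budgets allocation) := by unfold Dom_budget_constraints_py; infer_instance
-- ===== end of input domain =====

-- B builds the constraint matrix column-major (filter kept agents, per-agent index sets, one column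
-- per item position plus the slack column, then a zip(*)-transpose) instead of A's row-by-row
-- zero-fill-and-index-write loop; equally costly, just a different construction.


-- ===== PORT A =====
-- _bundle_to_row: result = len(all_items)*[0]; for item in bundle: result[all_items.index(item)] = coefficient.
-- all_items.index(item) raises ValueError when item is not in all_items (index? = none); such inputs are
-- outside Pre_ — there the port leaves the row unchanged.
def bundleToRow (all_items : String) (bundle : String) (coefficient : Int) : List Int :=
  bundle.toList.foldl
    (fun result item =>
      match PySem.List.index? all_items.toList item with
      | some k => result.set k coefficient
      | none => result)
    (List.replicate all_items.toList.length 0)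

def budget_constraints_py (all_items : String) (budgets : List Int) (allocation : List String) : List (List Int) × List Int :=
  (PySem.List.pyRange 0 (PySem.List.len budgets) 1).foldl
    (fun acc i =>
      if PySem.Str.len (PySem.List.pyGetD allocation i "") > 0 ∨ PySem.List.pyGetD budgets i 0 < 0 then
        (acc.1 ++ [bundleToRow all_items (PySem.List.pyGetD allocation i "") 1 ++ [0]],
         acc.2 ++ [PySem.List.pyGetD budgets i 0])
      else acc)
    ([], [])

-- ===== PORT B =====
-- Hand port of Python's zip(*columns): row j, for every j below the minimum column length, collects the
-- j-th entry of every column; exact because j < every column's length, so getD never uses its default.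
def pyZipStar (cols : List (List Int)) : List (List Int) :=
  (List.range (((cols.map List.length).min?).getD 0)).map
    (fun j => cols.map (fun c => c.getD j 0))

-- kept = [(bud, bundle) for bud, bundle in zip(budgets, allocation) if bundle or bud < 0]
-- occupied = [{all_items.index(ch) for ch in bundle} for _, bundle in kept]   -- Python sets (PySem.Set);
--   all_items.index(ch) raises ValueError when ch is absent (index? = none); such inputs are outside
--   Pre_ — there the port skips the missing item (filterMap).
-- columns = [[1 if i in s else 0 for s in occupied] for i in range(len(all_items))]; columns.append([0]*len(kept))
-- A_equality = [list(row) for row in zip(*columns)]; b_equality = [bud for bud, _ in kept]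
def budget_constraints_py_alt (all_items : String) (budgets : List Int) (allocation : List String) : List (List Int) × List Int :=
  let kept := (budgets.zip allocation).filter (fun p => decide (p.2.toList ≠ [] ∨ p.1 < 0))
  let occupied : List (PySem.Set Nat) :=
    kept.map (fun p => PySem.Set.ofList
      (p.2.toList.filterMap (fun ch => PySem.List.index? all_items.toList ch)))
  let columns :=
    (List.range all_items.toList.length).map
      (fun i => occupied.map (fun s => if i ∈ s then (1 : Int) else 0))
    ++ [List.replicate kept.length 0]
  (pyZipStar columns, kept.map (fun p => p.1))

-- ===== PRECONDITION & SPEC =====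
-- Pre_ excludes exactly the inputs where A raises: allocation shorter than budgets (IndexError at
-- allocation[i]) and a bundle character absent from all_items (ValueError from .index).
def Pre_budget_constraints_py (all_items : String) (budgets : List Int) (allocation : List String) : Prop :=
  budgets.length ≤ allocation.length ∧
  ((allocation.take budgets.length).all
    (fun b => b.toList.all (fun c => all_items.toList.contains c))) = true
instance (all_items : String) (budgets : List Int) (allocation : List String) : Decidable (Pre_budget_constraints_py all_items budgets allocation) := by unfold Pre_budget_constraints_py; infer_instance

def pvWitness_budget_constraints_py : String × List Int × List String := ("wxyz", [5, 2], ["xz", "y"])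


def Spec_budget_constraints_py (all_items : String) (budgets : List Int) (allocation : List String) (out : List (List Int) × List Int) : Prop := out = budget_constraints_py_alt all_items budgets allocation
instance (all_items : String) (budgets : List Int) (allocation : List String) (out : List (List Int) × List Int) : Decidable (Spec_budget_constraints_py all_items budgets allocation out) := by unfold Spec_budget_constraints_py; infer_instance

-- ===== CLAIM (what is proved, stated in full; the proofs are below) =====
def Claim_equal_budget_constraints_py : Prop := ∀ (all_items : String) (budgets : List Int) (allocation : List String), Dom_budget_constraints_py all_items budgets allocation → Pre_budget_constraints_py all_items budgets allocation → Spec_budget_constraints_py all_items budgets allocation (budget_constraints_py all_items budgets allocation)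


-- ===== LEMMAS AND PROOFS =====

theorem idxOf?_of_mem {α : Type} [DecidableEq α] (c : α) (items : List α) (h : c ∈ items) :
    items.idxOf? c = some (items.idxOf c) := by
  induction items with
  | nil => simp at h
  | cons x t ih =>
    by_cases hx : x = c
    · subst hx; simp [List.idxOf?_cons]
    · rcases List.mem_cons.1 h with h1 | h2
      · exact absurd h1.symm hx
      · simp [List.idxOf?_cons, hx, ih h2, beq_iff_eq]

-- setting one in-range position of a range-mapped row is a pointwise update of the mapping function
theorem set_range_map (n : Nat) (f : Nat → Int) (k : Nat) (v : Int) (_hk : k < n) :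
    ((List.range n).map f).set k v = (List.range n).map (fun i => if i = k then v else f i) := by
  apply List.ext_getElem (by simp)
  intro i h1 h2
  simp only [List.getElem_set, List.getElem_map, List.getElem_range]
  simp only [List.length_set, List.length_map, List.length_range] at h1
  by_cases hik : i = k
  · simp [hik]
  · simp only [if_neg hik, if_neg (fun hki => hik (Eq.symm hki))]

-- the .index-write loop of _bundle_to_row, as a loop over the written positions
theorem foldSet (items : List Char) (cs : List Char) (coef : Int) (f : Nat → Int)
    (h : ∀ c ∈ cs, c ∈ items) :
    cs.foldl (fun r c => r.set (items.idxOf c) coef) ((List.range items.length).map f)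
      = (List.range items.length).map
          (fun i => if i ∈ cs.map (fun c => items.idxOf c) then coef else f i) := by
  induction cs generalizing f with
  | nil => simp
  | cons c cs ih =>
    simp only [List.foldl_cons]
    rw [set_range_map items.length f (items.idxOf c) coef
          (List.idxOf_lt_length_of_mem (h c List.mem_cons_self)),
        ih (fun i => if i = items.idxOf c then coef else f i)
          (fun d hd => h d (List.mem_cons_of_mem c hd))]
    apply List.map_congr_left
    intro i _
    simp only [List.map_cons, List.mem_cons]
    by_cases h1 : i ∈ cs.map (fun c => items.idxOf c) <;>
      by_cases h2 : i = items.idxOf c <;> simp [h1, h2]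

-- when every bundle char occurs in all_items, index? is idxOf and filterMap is map idxOf
theorem filterMap_index?_eq_map (items cs : List Char) (h : ∀ c ∈ cs, c ∈ items) :
    cs.filterMap (fun item => PySem.List.index? items item)
      = cs.map (fun item => items.idxOf item) := by
  simp only [PySem.List.index?_eq_idxOf?]
  induction cs with
  | nil => simp
  | cons c cs ih =>
    rw [List.filterMap_cons, List.map_cons,
        idxOf?_of_mem c items (h c List.mem_cons_self)]
    simp only [List.cons.injEq, true_and]
    exact ih (fun d hd => h d (List.mem_cons_of_mem c hd))

-- the per-agent row of A equals the membership-indicator row over the bundle's index set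
theorem bundleToRow_eq_map (all_items bundle : String)
    (h : ∀ c ∈ bundle.toList, c ∈ all_items.toList) :
    bundleToRow all_items bundle 1
      = (List.range all_items.toList.length).map
          (fun i => if i ∈ PySem.Set.ofList
              (bundle.toList.filterMap (fun item => PySem.List.index? all_items.toList item))
            then (1 : Int) else 0) := by
  unfold bundleToRow
  have hrep : List.replicate all_items.toList.length (0 : Int)
      = (List.range all_items.toList.length).map (fun _ => (0 : Int)) := by
    simp [List.map_const']
  rw [hrep,
      PySem.List.foldl_congr_mem bundle.toList _
        (fun r item => r.set (all_items.toList.idxOf item) 1) _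
        (fun acc x hx => by
          rw [PySem.List.index?_eq_idxOf?, idxOf?_of_mem x all_items.toList (h x hx)]),
      foldSet all_items.toList bundle.toList 1 _ h]
  apply List.map_congr_left
  intro i _
  rw [filterMap_index?_eq_map all_items.toList bundle.toList h]
  by_cases hm : i ∈ bundle.toList.map (fun c => all_items.toList.idxOf c)
  · simp [hm, (PySem.Set.mem_ofList _ _).2 hm]
  · simp only [if_neg hm,
      if_neg (fun hc => hm ((PySem.Set.mem_ofList _ _).1 hc))]

-- A's index loop over range(len(budgets)) is the fold over the zipped prefixes
theorem rangefold_eq_zipfold (ai : String) (bs : List Int) (al : List String)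
    (n : Nat) (h1 : n ≤ bs.length) (h2 : n ≤ al.length) (init : List (List Int) × List Int) :
    (PySem.List.pyRange 0 (n : Int) 1).foldl
      (fun acc i =>
        if PySem.Str.len (PySem.List.pyGetD al i "") > 0 ∨ PySem.List.pyGetD bs i 0 < 0 then
          (acc.1 ++ [bundleToRow ai (PySem.List.pyGetD al i "") 1 ++ [0]],
           acc.2 ++ [PySem.List.pyGetD bs i 0])
        else acc) init
    = ((bs.take n).zip (al.take n)).foldl
        (fun acc p =>
          if PySem.Str.len p.2 > 0 ∨ p.1 < 0 then
            (acc.1 ++ [bundleToRow ai p.2 1 ++ [0]], acc.2 ++ [p.1])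
          else acc) init := by
  induction n generalizing init with
  | zero => simp [PySem.List.pyRange_one_eq_nil]
  | succ m ih =>
    have hm1 : m < bs.length := h1
    have hm2 : m < al.length := h2
    rw [show ((m + 1 : Nat) : Int) = (m : Int) + 1 by push_cast; ring,
        PySem.List.pyRange_one_succ_right (by positivity),
        List.foldl_append, ih (le_of_lt hm1) (le_of_lt hm2) init,
        List.take_add_one, List.take_add_one,
        List.getElem?_eq_getElem hm1, List.getElem?_eq_getElem hm2,
        List.zip_append (by simp [List.length_take]; omega),
        List.foldl_append]
    simp [List.getD_eq_getElem?_getD, List.getElem?_eq_getElem hm1, List.getElem?_eq_getElem hm2]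

-- the pair-appending filter loop, split into its two filtered map components
theorem pairfold_eq_filter_map {α : Type} (c : α → Bool) (f : α → List Int) (g : α → Int)
    (xs : List α) (l1 : List (List Int)) (l2 : List Int) :
    xs.foldl (fun acc p => if c p then (acc.1 ++ [f p], acc.2 ++ [g p]) else acc) (l1, l2)
      = (l1 ++ (xs.filter c).map f, l2 ++ (xs.filter c).map g) := by
  induction xs generalizing l1 l2 with
  | nil => simp
  | cons x t ih =>
    by_cases hx : c x
    · simp [hx, ih]
    · simp [hx, ih]

theorem foldl_min_replicate (k a : Nat) : List.foldl min a (List.replicate k a) = a := by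
  induction k with
  | zero => rfl
  | succ m ih => simp only [List.replicate_succ, List.foldl_cons, min_self]; exact ih

-- zip(*columns) of uniform columns generated by a nonempty list of column functions
theorem pyZipStar_map (fs : List ((Int × String) → Int)) (l : List (Int × String))
    (hfs : fs ≠ []) :
    pyZipStar (fs.map (fun f => l.map f)) = l.map (fun p => fs.map (fun f => f p)) := by
  unfold pyZipStar
  have hlen : (fs.map (fun f => l.map f)).map List.length
      = List.replicate fs.length l.length := by
    simp [List.map_map, Function.comp_def]
  have hmin : (List.replicate fs.length l.length).min? = some l.length := by
    cases fs with
    | nil => exact absurd rfl hfs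
    | cons f t =>
      simp only [List.length_cons, List.replicate_succ]
      rw [List.min?_cons']
      exact congrArg some (foldl_min_replicate t.length l.length)
  rw [hlen, hmin]
  apply List.ext_getElem (by simp)
  intro i h1 h2
  simp only [List.getElem_map, List.getElem_range, List.map_map, Function.comp_def]
  apply List.map_congr_left
  intro f _
  simp only [List.length_map, List.length_range] at h1
  rw [List.getD_eq_getElem?_getD, List.getElem?_map, List.getElem?_eq_getElem h1]
  rfl

-- ===== VERDICT (by name: the statement is the Claim_ definition above) =====
theorem budget_constraints_py_spec : Claim_equal_budget_constraints_py := by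
  intro ai bs al _hDom hPre
  obtain ⟨hlen, hmemB⟩ := hPre
  have hmem : ∀ b ∈ al.take bs.length, ∀ c ∈ b.toList, c ∈ ai.toList := by
    simpa [List.all_eq_true] using hmemB
  unfold Spec_budget_constraints_py budget_constraints_py budget_constraints_py_alt
  rw [PySem.List.len_eq, rangefold_eq_zipfold ai bs al bs.length le_rfl hlen ([], [])]
  have hz2 : bs.zip al = bs.zip (al.take bs.length) := by
    conv_lhs => rw [List.zip_eq_zip_take_min]
    rw [min_eq_left hlen, List.take_length]
  have hz : (bs.take bs.length).zip (al.take bs.length) = bs.zip al := by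
    rw [List.take_length, hz2]
  rw [hz]
  -- convert A's fold condition to B's boolean filter condition, then split the pair fold
  have hcongr :
      (bs.zip al).foldl
        (fun acc p =>
          if PySem.Str.len p.2 > 0 ∨ p.1 < 0 then
            (acc.1 ++ [bundleToRow ai p.2 1 ++ [0]], acc.2 ++ [p.1])
          else acc) (([] : List (List Int)), ([] : List Int))
      = (bs.zip al).foldl
        (fun acc p =>
          if decide (p.2.toList ≠ [] ∨ p.1 < 0) then
            (acc.1 ++ [bundleToRow ai p.2 1 ++ [0]], acc.2 ++ [p.1])
          else acc) ([], []) := by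
    apply PySem.List.foldl_congr_mem
    intro acc p _
    have hcond : (PySem.Str.len p.2 > 0 ∨ p.1 < 0) ↔ (p.2.toList ≠ [] ∨ p.1 < 0) := by
      constructor <;> intro h <;> rcases h with h | h
      · left; intro hnil; rw [PySem.Str.len_eq, hnil] at h; simp at h
      · right; exact h
      · left; rw [PySem.Str.len_eq]; have := List.length_pos_iff.mpr h; omega
      · right; exact h
    rcases Decidable.em (p.2.toList ≠ [] ∨ p.1 < 0) with h | h
    · rw [if_pos (hcond.mpr h), if_pos (by simpa using h)]
    · rw [if_neg (fun hc => h (hcond.mp hc)), if_neg (by simpa using h)]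
  rw [hcongr,
      pairfold_eq_filter_map (fun p => decide (p.2.toList ≠ [] ∨ p.1 < 0))
        (fun p => bundleToRow ai p.2 1 ++ [0]) (fun p => p.1) (bs.zip al) [] []]
  -- now rewrite B's columns as maps of the kept list by a list of column functions
  set kept := (bs.zip al).filter (fun p => decide (p.2.toList ≠ [] ∨ p.1 < 0)) with hkept
  have hkeptmem : ∀ p ∈ kept, ∀ c ∈ p.2.toList, c ∈ ai.toList := by
    intro p hp
    have hpz : p ∈ bs.zip (al.take bs.length) := hz2 ▸ List.mem_of_mem_filter hp
    exact hmem p.2 (List.of_mem_zip hpz).2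
  -- column functions: one per item position, then the slack column
  have hcols :
      (List.range ai.toList.length).map
        (fun i => (kept.map (fun p => PySem.Set.ofList
            (p.2.toList.filterMap (fun ch => PySem.List.index? ai.toList ch)))).map
          (fun s => if i ∈ s then (1 : Int) else 0))
      ++ [List.replicate kept.length 0]
      = ((List.range ai.toList.length).map
          (fun i => (fun p : Int × String => if i ∈ PySem.Set.ofList
              (p.2.toList.filterMap (fun ch => PySem.List.index? ai.toList ch))
            then (1 : Int) else 0)) ++ [fun _ => (0 : Int)]).map
          (fun f => kept.map f) := by
    rw [List.map_append, List.map_map]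
    congr 1
    · apply List.map_congr_left; intro i _; simp [List.map_map, Function.comp_def]
    · simp [List.map_const']
  simp only [hcols]
  rw [pyZipStar_map _ kept (by simp)]
  refine Prod.ext ?_ (by simp)
  simp only [List.nil_append, List.map_append, List.map_map, Function.comp_def]
  apply List.map_congr_left
  intro p hp
  rw [bundleToRow_eq_map ai p.2 (hkeptmem p hp)]
  simp
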